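-- pv_equiv track=rewrite | github.com/noahpaik/dart | src/dart_pipeline/routing/coverage_router.py | _normalize_alias_map
-- ===== SOURCE A (Python) =====
-- from collections.abc import Mapping
--
-- def _normalize_alias_map(role_aliases: Mapping[str, str] | None) -> dict[str, str]:
--     if role_aliases is None:
--         return {}
--     if not isinstance(role_aliases, Mapping):
--         raise ValueError("role_aliases must be a mapping of str to str")
--
--     normalized_aliases: dict[str, str] = {}
--     for raw_alias, raw_canonical in role_aliases.items():
--         if not isinstance(raw_alias, str) or not isinstance(raw_canonical, str):
--             raise ValueError("role_aliases must be a mapping of str to str")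
--         alias = raw_alias.strip().lower()
--         canonical = raw_canonical.strip().lower()
--         normalized_aliases[alias] = canonical
--
--     resolved_aliases: dict[str, str] = {}
--
--     def resolve(alias: str) -> str:
--         seen: set[str] = set()
--         current = alias
--         while current in normalized_aliases:
--             if current in seen:
--                 raise ValueError("role_aliases contains a cycle")
--             seen.add(current)
--             current = normalized_aliases[current]
--         return current
--
--     for alias in normalized_aliases:
--         resolved_aliases[alias] = resolve(alias)
--
--     return resolved_aliases
-- ===== SOURCE B (Python) =====
-- from collections.abc import Mapping
--
--
-- def _normalize_alias_map(role_aliases):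
--     if role_aliases is None:
--         return {}
--     if not isinstance(role_aliases, Mapping):
--         raise ValueError("role_aliases must be a mapping of str to str")
--
--     normalized = {}
--     for raw_alias, raw_canonical in role_aliases.items():
--         if not isinstance(raw_alias, str) or not isinstance(raw_canonical, str):
--             raise ValueError("role_aliases must be a mapping of str to str")
--         normalized[raw_alias.strip().lower()] = raw_canonical.strip().lower()
--
--     # Single pass with memoization + path compression: each node of the alias
--     # graph is walked at most once over the whole map.
--     memo = {}
--     for alias in normalized:
--         if alias in memo:
--             continue
--         path = []
--         on_path = set()
--         cur = alias
--         while cur in normalized and cur not in memo: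
--             if cur in on_path:
--                 raise ValueError("role_aliases contains a cycle")
--             on_path.add(cur)
--             path.append(cur)
--             cur = normalized[cur]
--         end = memo.get(cur, cur)
--         for node in path:
--             memo[node] = end
--
--     return {alias: memo[alias] for alias in normalized}
-- ===== Notes on version B (the rewrite author's own statement) =====
-- stated objective: alternative
-- what changed: A re-walks the whole alias chain from scratch for every key (with a per-key seen set); B resolves all keys in one pass with a memo dict and path compression, so each node is walked at most once.
import Mathlib
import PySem

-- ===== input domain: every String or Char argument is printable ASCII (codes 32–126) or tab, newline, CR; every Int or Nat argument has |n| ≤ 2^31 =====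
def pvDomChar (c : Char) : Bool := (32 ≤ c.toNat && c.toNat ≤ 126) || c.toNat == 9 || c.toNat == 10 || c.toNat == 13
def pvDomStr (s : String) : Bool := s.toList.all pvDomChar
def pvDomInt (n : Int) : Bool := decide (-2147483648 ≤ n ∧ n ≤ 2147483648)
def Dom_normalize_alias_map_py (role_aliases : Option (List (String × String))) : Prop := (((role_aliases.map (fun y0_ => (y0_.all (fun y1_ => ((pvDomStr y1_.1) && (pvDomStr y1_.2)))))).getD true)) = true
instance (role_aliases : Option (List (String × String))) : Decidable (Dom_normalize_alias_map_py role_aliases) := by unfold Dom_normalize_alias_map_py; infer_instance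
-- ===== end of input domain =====

-- B replaces A's per-key chain re-walk by one memoized pass with path compression (a different algorithm; each node is walked at most once).

-- shared helper: the normalization loop is textually identical in both Pythons
-- ('normalized[raw_alias.strip().lower()] = raw_canonical.strip().lower()')
def pvKey (s : String) : String := PySem.Str.lower (PySem.Str.strip s)

def pvNormMap (ra : List (String × String)) : PySem.Dict String String :=
  ra.foldl (fun d kv => d.insert (pvKey kv.1) (pvKey kv.2)) PySem.Dict.empty

-- ===== PORT A =====
-- A's 'resolve': while current in normalized: raise on revisit, else step.
-- Fuel m.size + 1 suffices in Python (seen grows each iteration); on the raise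
-- branch (cycle) Python raises ValueError — excluded by Pre_ below.
def pvResolveA (m : PySem.Dict String String) : Nat → PySem.Set String → String → String
  | 0, _, cur => cur
  | f+1, seen, cur =>
    match m.get? cur with
    | none => cur
    | some v =>
      if PySem.Set.contains seen cur then cur  -- Python: raise ValueError("cycle"); outside Pre_
      else pvResolveA m f (PySem.Set.add seen cur) v

def normalize_alias_map_py (role_aliases : Option (List (String × String))) : List (String × String) :=
  match role_aliases with
  | none => []
  | some ra =>
    let m := pvNormMap ra
    (m.keys.foldl (fun d k => d.insert k (pvResolveA m (m.size + 1) PySem.Set.empty k))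
      PySem.Dict.empty).items

-- ===== PORT B =====
-- B's inner while loop: walk until cur leaves the map or is memoized; returns (path, cur).
-- Fuel m.size + 1 suffices in Python (on_path grows each iteration); the
-- on_path branch is Python's raise ValueError("cycle") — outside Pre_.
def pvWalkB (m memo : PySem.Dict String String) :
    Nat → List String → PySem.Set String → String → (List String × String)
  | 0, path, _, cur => (path, cur)
  | f+1, path, onp, cur =>
    if m.contains cur && !(memo.contains cur) then
      if PySem.Set.contains onp cur then (path, cur)  -- Python: raise ValueError("cycle"); outside Pre_
      else pvWalkB m memo f (path ++ [cur]) (PySem.Set.add onp cur) (m.getD cur cur)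
    else (path, cur)

-- B's loop body for one alias
def pvStepB (m : PySem.Dict String String) (memo : PySem.Dict String String) (al : String) :
    PySem.Dict String String :=
  if memo.contains al then memo
  else
    let pc := pvWalkB m memo (m.size + 1) [] PySem.Set.empty al
    let e := memo.getD pc.2 pc.2
    pc.1.foldl (fun d p => d.insert p e) memo

def normalize_alias_map_py_alt (role_aliases : Option (List (String × String))) : List (String × String) :=
  match role_aliases with
  | none => []
  | some ra =>
    let m := pvNormMap ra
    let memo := m.keys.foldl (pvStepB m) PySem.Dict.empty
    m.keys.map (fun k => (k, memo.getD k k))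

-- ===== PRECONDITION & SPEC =====
-- j-fold iterate of the alias lookup: a mathematical description of the alias
-- chain (neither port's algorithm: A walks with a seen set, B with a memo/path).
def pvChase (m : PySem.Dict String String) : Nat → String → String
  | 0, cur => cur
  | f+1, cur => match m.get? cur with | none => cur | some v => pvChase m f v

-- Pre_ excludes exactly the alias maps containing a cycle, on which A (and B) raise
-- ValueError: acyclicity, stated as "every chain leaves the key set within size steps".
def Pre_normalize_alias_map_py (role_aliases : Option (List (String × String))) : Prop :=
  ((role_aliases.map (fun ra =>
      (pvNormMap ra).keys.all (fun k =>
        ((pvNormMap ra).get? (pvChase (pvNormMap ra) (pvNormMap ra).size k)).isNone))).getD true) = true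
instance (role_aliases : Option (List (String × String))) : Decidable (Pre_normalize_alias_map_py role_aliases) := by unfold Pre_normalize_alias_map_py; infer_instance

def pvWitness_normalize_alias_map_py : (Option (List (String × String))) := some [(" A ", "b"), ("b", "c")]

def Spec_normalize_alias_map_py (role_aliases : Option (List (String × String))) (out : List (String × String)) : Prop := out = normalize_alias_map_py_alt role_aliases
instance (role_aliases : Option (List (String × String))) (out : List (String × String)) : Decidable (Spec_normalize_alias_map_py role_aliases out) := by unfold Spec_normalize_alias_map_py; infer_instance

-- ===== CLAIM (what is proved, stated in full; the proofs are below) =====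
def Claim_equal_normalize_alias_map_py : Prop := ∀ (role_aliases : Option (List (String × String))), Dom_normalize_alias_map_py role_aliases → Pre_normalize_alias_map_py role_aliases → Spec_normalize_alias_map_py role_aliases (normalize_alias_map_py role_aliases)

-- ===== LEMMAS AND PROOFS =====

theorem chase_of_get?_none {m : PySem.Dict String String} {x : String}
    (h : m.get? x = none) (f : Nat) : pvChase m f x = x := by
  cases f with
  | zero => rfl
  | succ f => simp [pvChase, h]

theorem chase_add (m : PySem.Dict String String) (i j : Nat) (x : String) :
    pvChase m (i + j) x = pvChase m j (pvChase m i x) := by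
  induction i generalizing x with
  | zero => simp [pvChase]
  | succ i ih =>
    cases h : m.get? x with
    | none => rw [chase_of_get?_none h, chase_of_get?_none h, chase_of_get?_none h]
    | some v =>
      rw [Nat.add_right_comm i 1 j]
      simp only [pvChase, h]
      exact ih v

theorem chase_stable {m : PySem.Dict String String} {e : Nat} {x : String}
    (h : m.get? (pvChase m e x) = none) : ∀ g, e ≤ g → pvChase m g x = pvChase m e x := by
  intro g hg
  obtain ⟨d, rfl⟩ := Nat.exists_eq_add_of_le hg
  rw [chase_add, chase_of_get?_none h]

theorem endpoint_unique {m : PySem.Dict String String} {a b : Nat} {x : String}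
    (ha : m.get? (pvChase m a x) = none) (hb : m.get? (pvChase m b x) = none) :
    pvChase m a x = pvChase m b x := by
  rcases Nat.le_total a b with h | h
  · rw [chase_stable ha b h]
  · rw [chase_stable hb a h]

theorem no_exit_of_cycle {m : PySem.Dict String String} {x v : String} {p : Nat}
    (hx : m.get? x = some v) (hp : pvChase m p x = x) (hp1 : 1 ≤ p) :
    ∀ e, m.get? (pvChase m e x) ≠ none := by
  intro e
  induction e using Nat.strong_induction_on with
  | _ e ih =>
    intro he
    rcases Nat.lt_or_ge e p with hlt | hge
    · have h1 := chase_stable he p (Nat.le_of_lt hlt)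
      rw [hp] at h1
      rw [← h1, hx] at he
      cases he
    · obtain ⟨q, rfl⟩ : ∃ q, e = p + q := ⟨e - p, by omega⟩
      rw [chase_add, hp] at he
      exact ih q (by omega) he

theorem no_revisit {m : PySem.Dict String String} {x v : String} {f : Nat}
    (hx : m.get? x = some v) (hexit : m.get? (pvChase m f x) = none) :
    ∀ j, pvChase m j v ≠ x := by
  intro j hj
  have hcyc : pvChase m (j + 1) x = x := by
    rw [Nat.add_comm, chase_add]
    simp [pvChase, hx, hj]
  exact no_exit_of_cycle hx hcyc (by omega) f hexit

-- A's resolve equals plain chain-following under acyclicity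
theorem resolveA_eq_chase (m : PySem.Dict String String) :
    ∀ (f : Nat) (s : PySem.Set String) (cur : String),
    m.get? (pvChase m f cur) = none →
    (∀ x ∈ s, ∀ j, m.get? (pvChase m j cur) ≠ none → pvChase m j cur ≠ x) →
    pvResolveA m (f + 1) s cur = pvChase m f cur := by
  intro f
  induction f with
  | zero =>
    intro s cur h1 _
    simp only [pvChase] at h1 ⊢
    simp [pvResolveA, h1]
  | succ f ih =>
    intro s cur h1 h2
    cases h : m.get? cur with
    | none => rw [chase_of_get?_none h]; simp [pvResolveA, h]
    | some v =>
      have hchase : pvChase m (f + 1) cur = pvChase m f v := by simp [pvChase, h]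
      have hnotmem : cur ∉ s :=
        fun hmem => h2 cur hmem 0 (by simp [pvChase, h]) (by simp [pvChase])
      have hcontains : PySem.Set.contains s cur = false :=
        Bool.eq_false_iff.mpr (fun hc => hnotmem ((PySem.Set.contains_iff s cur).mp hc))
      have h1v : m.get? (pvChase m f v) = none := by rw [← hchase]; exact h1
      rw [hchase]
      show pvResolveA m (f + 1 + 1) s cur = _
      simp only [pvResolveA, h, hcontains, Bool.false_eq_true, if_false]
      apply ih _ v h1v
      intro x hx j hj
      rcases (PySem.Set.mem_add s cur x).mp hx with hxs | rfl
      · have hstep : pvChase m (j + 1) cur = pvChase m j v := by simp [pvChase, h]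
        have := h2 x hxs (j + 1) (by rw [hstep]; exact hj)
        rw [hstep] at this
        exact this
      · exact no_revisit h h1 j

-- memo invariant for B
def pvInv (m memo : PySem.Dict String String) : Prop :=
  memo.keys.Nodup ∧
  ∀ x y, memo.get? x = some y → x ∈ m.keys ∧ y = pvChase m m.size x

-- acyclicity hypothesis
def pvAcy (m : PySem.Dict String String) : Prop :=
  ∀ k ∈ m.keys, m.get? (pvChase m m.size k) = none

theorem get?_foldl_insert_const (e : String) :
    ∀ (l : List String) (d : PySem.Dict String String) (x : String),
    (l.foldl (fun d p => d.insert p e) d).get? x = if x ∈ l then some e else d.get? x := by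
  intro l
  induction l with
  | nil => simp
  | cons p rest ih =>
    intro d x
    simp only [List.foldl_cons, ih, PySem.Dict.get?_insert, List.mem_cons]
    by_cases h1 : x ∈ rest <;> by_cases h2 : x = p <;> simp [h1, h2]

theorem walkB_exit (m memo : PySem.Dict String String) (hacy : pvAcy m)
    (hinv : pvInv m memo) {f : Nat} {cur : String}
    (h1 : m.get? (pvChase m f cur) = none)
    (hstop : m.contains cur = false ∨ memo.contains cur = true) :
    memo.getD cur cur = pvChase m f cur := by
  rcases hstop with hc | hc
  · have hg : m.get? cur = none := (PySem.Dict.get?_eq_none_iff_contains m cur).mpr hc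
    rw [chase_of_get?_none hg]
    have hmg : memo.get? cur = none := by
      cases hmg : memo.get? cur with
      | none => rfl
      | some y =>
        have hk := (hinv.2 cur y hmg).1
        rw [(PySem.Dict.contains_iff_mem_keys m cur).mpr hk] at hc
        cases hc
    rw [PySem.Dict.getD_eq_get?_getD, hmg]
    rfl
  · rw [PySem.Dict.contains_eq_isSome_get?] at hc
    obtain ⟨y, hy⟩ := Option.isSome_iff_exists.mp hc
    obtain ⟨hk, rfl⟩ := hinv.2 cur y hy
    rw [PySem.Dict.getD_eq_get?_getD, hy]
    exact endpoint_unique (hacy cur hk) h1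

theorem walkB_spec (m : PySem.Dict String String) (hacy : pvAcy m) :
    ∀ (f : Nat) (memo : PySem.Dict String String) (path : List String)
      (onp : PySem.Set String) (cur : String),
    pvInv m memo →
    m.get? (pvChase m f cur) = none →
    (∀ x ∈ onp, ∀ j, m.get? (pvChase m j cur) ≠ none → pvChase m j cur ≠ x) →
    (let r := pvWalkB m memo (f + 1) path onp cur
     memo.getD r.2 r.2 = pvChase m f cur ∧
     (∃ newp, r.1 = path ++ newp ∧
        (m.contains cur = true → memo.contains cur = false → cur ∈ newp) ∧
        ∀ p ∈ newp, p ∈ m.keys ∧ memo.get? p = none ∧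
          pvChase m m.size p = pvChase m f cur)) := by
  intro f
  induction f with
  | zero =>
    intro memo path onp cur hinv h1 h2
    simp only [pvChase] at h1
    have hc : m.contains cur = false := (PySem.Dict.get?_eq_none_iff_contains m cur).mp h1
    dsimp only
    simp only [pvWalkB, hc, Bool.false_and, if_neg Bool.false_ne_true]
    refine ⟨walkB_exit m memo hacy hinv (f := 0) h1 (Or.inl hc), [], by simp, ?_, by simp⟩
    intro h _
    exact absurd h Bool.false_ne_true
  | succ f ih =>
    intro memo path onp cur hinv h1 h2
    dsimp only
    by_cases hmc : m.contains cur = true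
    · by_cases hnm : memo.contains cur = true
      · -- exit: already memoized
        simp only [pvWalkB, hmc, hnm, Bool.not_true, Bool.and_false, if_neg Bool.false_ne_true]
        refine ⟨walkB_exit m memo hacy hinv h1 (Or.inr hnm), [], by simp, ?_, by simp⟩
        intro _ h
        exact absurd h (by simp)
      · -- step
        have hnm' : memo.contains cur = false := Bool.eq_false_iff.mpr hnm
        obtain ⟨v, hv⟩ : ∃ v, m.get? cur = some v := by
          rw [PySem.Dict.contains_eq_isSome_get?] at hmc
          exact Option.isSome_iff_exists.mp hmc
        have hstep : pvChase m (f + 1) cur = pvChase m f v := by simp [pvChase, hv]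
        have hnp : PySem.Set.contains onp cur = false :=
          Bool.eq_false_iff.mpr (fun hc =>
            h2 cur ((PySem.Set.contains_iff onp cur).mp hc) 0 (by simp [pvChase, hv]) (by simp [pvChase]))
        have hget : m.getD cur cur = v := by rw [PySem.Dict.getD_eq_get?_getD, hv]; rfl
        have h1' : m.get? (pvChase m f v) = none := by rw [← hstep]; exact h1
        have h2' : ∀ x ∈ PySem.Set.add onp cur, ∀ j,
            m.get? (pvChase m j v) ≠ none → pvChase m j v ≠ x := by
          intro x hx j hj
          rcases (PySem.Set.mem_add onp cur x).mp hx with hxs | rfl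
          · have hs : pvChase m (j + 1) cur = pvChase m j v := by simp [pvChase, hv]
            have := h2 x hxs (j + 1) (by rw [hs]; exact hj)
            rw [hs] at this; exact this
          · exact no_revisit hv h1 j
        have := ih memo (path ++ [cur]) (PySem.Set.add onp cur) v hinv h1' h2'
        dsimp only at this
        obtain ⟨hi, newp, hr1, _, hprop⟩ := this
        have hred : pvWalkB m memo (f + 1 + 1) path onp cur
            = pvWalkB m memo (f + 1) (path ++ [cur]) (PySem.Set.add onp cur) v := by
          simp only [pvWalkB, hmc, hnm', hnp, hget, Bool.not_false, Bool.and_self,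
            Bool.false_eq_true, if_false, if_true]
        rw [hred]
        refine ⟨by rw [hstep]; exact hi, cur :: newp, ?_, fun _ _ => List.mem_cons_self, ?_⟩
        · rw [hr1, List.append_assoc]; rfl
        · intro p hp
          rcases List.mem_cons.mp hp with rfl | hp'
          · refine ⟨(PySem.Dict.contains_iff_mem_keys m p).mp hmc,
              (PySem.Dict.get?_eq_none_iff_contains memo p).mpr hnm', ?_⟩
            exact endpoint_unique (hacy p ((PySem.Dict.contains_iff_mem_keys m p).mp hmc)) h1
          · obtain ⟨ha, hb, hc⟩ := hprop p hp'
            exact ⟨ha, hb, by rw [hstep]; exact hc⟩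
    · -- exit: cur not a key
      have hmc' : m.contains cur = false := Bool.eq_false_iff.mpr hmc
      have hg : m.get? cur = none := (PySem.Dict.get?_eq_none_iff_contains m cur).mpr hmc'
      simp only [pvWalkB, hmc', Bool.false_and, if_neg Bool.false_ne_true]
      refine ⟨walkB_exit m memo hacy hinv h1 (Or.inl hmc'), [], by simp, ?_, by simp⟩
      intro h _
      exact absurd h Bool.false_ne_true

theorem stepB_spec (m : PySem.Dict String String) (hacy : pvAcy m)
    (memo : PySem.Dict String String) (k : String)
    (hinv : pvInv m memo) (hk : k ∈ m.keys) :
    pvInv m (pvStepB m memo k) ∧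
    (∀ x y, memo.get? x = some y → (pvStepB m memo k).get? x = some y) ∧
    (pvStepB m memo k).get? k = some (pvChase m m.size k) := by
  by_cases hc : memo.contains k = true
  · have hstep : pvStepB m memo k = memo := by unfold pvStepB; rw [if_pos hc]
    rw [hstep]
    refine ⟨hinv, fun x y h => h, ?_⟩
    rw [PySem.Dict.contains_eq_isSome_get?] at hc
    obtain ⟨y, hy⟩ := Option.isSome_iff_exists.mp hc
    obtain ⟨-, rfl⟩ := hinv.2 k y hy
    exact hy
  · have hc' : memo.contains k = false := Bool.eq_false_iff.mpr hc
    have h1 : m.get? (pvChase m m.size k) = none := hacy k hk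
    have h2 : ∀ x ∈ (PySem.Set.empty : PySem.Set String), ∀ j,
        m.get? (pvChase m j k) ≠ none → pvChase m j k ≠ x := by
      intro x hx; cases hx
    have hw := walkB_spec m hacy m.size memo [] PySem.Set.empty k hinv h1 h2
    dsimp only at hw
    obtain ⟨hi, newp, hr1, hinnew, hprop⟩ := hw
    rw [List.nil_append] at hr1
    have hstep : pvStepB m memo k
        = (pvWalkB m memo (m.size + 1) [] PySem.Set.empty k).1.foldl
            (fun d p => d.insert p
              (memo.getD (pvWalkB m memo (m.size + 1) [] PySem.Set.empty k).2
                (pvWalkB m memo (m.size + 1) [] PySem.Set.empty k).2)) memo := by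
      unfold pvStepB; rw [if_neg (by rw [hc']; exact Bool.false_ne_true)]
    rw [hstep, hi]
    refine ⟨⟨PySem.Dict.nodup_keys_foldl_insert _ (fun _ _ => pvChase m m.size k) memo hinv.1, ?_⟩, ?_, ?_⟩
    · intro x y hxy
      rw [get?_foldl_insert_const] at hxy
      by_cases hx : x ∈ (pvWalkB m memo (m.size + 1) [] PySem.Set.empty k).1
      · rw [if_pos hx] at hxy
        rw [hr1] at hx
        obtain ⟨ha, -, hcc⟩ := hprop x hx
        cases hxy
        exact ⟨ha, hcc.symm⟩
      · rw [if_neg hx] at hxy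
        exact hinv.2 x y hxy
    · intro x y hxy
      rw [get?_foldl_insert_const]
      by_cases hx : x ∈ (pvWalkB m memo (m.size + 1) [] PySem.Set.empty k).1
      · rw [hr1] at hx
        obtain ⟨-, hnone, -⟩ := hprop x hx
        rw [hnone] at hxy; cases hxy
      · rw [if_neg hx]; exact hxy
    · rw [get?_foldl_insert_const]
      have hkk : k ∈ (pvWalkB m memo (m.size + 1) [] PySem.Set.empty k).1 := by
        rw [hr1]
        exact hinnew ((PySem.Dict.contains_iff_mem_keys m k).mpr hk) hc'
      rw [if_pos hkk]

theorem foldl_stepB_spec (m : PySem.Dict String String) (hacy : pvAcy m) :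
    ∀ (l : List String) (memo : PySem.Dict String String),
    pvInv m memo → (∀ x ∈ l, x ∈ m.keys) →
    pvInv m (l.foldl (pvStepB m) memo) ∧
    (∀ x y, memo.get? x = some y → (l.foldl (pvStepB m) memo).get? x = some y) ∧
    (∀ x ∈ l, (l.foldl (pvStepB m) memo).get? x = some (pvChase m m.size x)) := by
  intro l
  induction l with
  | nil => intro memo hinv _; exact ⟨hinv, fun _ _ h => h, by intro x hx; cases hx⟩
  | cons k rest ih =>
    intro memo hinv hmem
    have hk : k ∈ m.keys := hmem k (List.mem_cons_self)
    obtain ⟨hinv1, hmono1, hget1⟩ := stepB_spec m hacy memo k hinv hk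
    obtain ⟨hinv2, hmono2, hget2⟩ := ih (pvStepB m memo k) hinv1
      (fun x hx => hmem x (List.mem_cons_of_mem k hx))
    refine ⟨hinv2, fun x y h => hmono2 x y (hmono1 x y h), ?_⟩
    intro x hx
    rcases List.mem_cons.mp hx with rfl | hx'
    · exact hmono2 x _ hget1
    · exact hget2 x hx' 

-- ===== VERDICT (by name: the statement is the Claim_ definition above) =====
theorem normalize_alias_map_py_spec : Claim_equal_normalize_alias_map_py := by
  intro role_aliases _hdom hpre
  unfold Spec_normalize_alias_map_py
  cases role_aliases with
  | none => rfl
  | some ra =>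
    have hacy : pvAcy (pvNormMap ra) := by
      intro k hk
      simp only [Pre_normalize_alias_map_py, Option.map_some, Option.getD_some,
        List.all_eq_true] at hpre
      exact Option.isNone_iff_eq_none.mp (hpre k hk)
    have hnodup : (pvNormMap ra).keys.Nodup :=
      PySem.Dict.nodup_keys_foldl_insert_key ra (fun kv => pvKey kv.1)
        (fun _ kv => pvKey kv.2) PySem.Dict.empty PySem.Dict.nodup_keys_empty
    have hinv0 : pvInv (pvNormMap ra) PySem.Dict.empty := by
      refine ⟨PySem.Dict.nodup_keys_empty, ?_⟩
      intro x y h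
      rw [PySem.Dict.get?_empty] at h
      cases h
    obtain ⟨-, -, hget⟩ := foldl_stepB_spec (pvNormMap ra) hacy (pvNormMap ra).keys
      PySem.Dict.empty hinv0 (fun x hx => hx)
    show normalize_alias_map_py (some ra) = normalize_alias_map_py_alt (some ra)
    simp only [normalize_alias_map_py, normalize_alias_map_py_alt]
    have hA : ((pvNormMap ra).keys.foldl
        (fun d k => d.insert k (pvResolveA (pvNormMap ra) ((pvNormMap ra).size + 1) PySem.Set.empty k))
        PySem.Dict.empty).items
        = (pvNormMap ra).keys.map
            (fun k => (k, pvResolveA (pvNormMap ra) ((pvNormMap ra).size + 1) PySem.Set.empty k)) := by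
      have h := PySem.Dict.items_foldl_insert_fresh (pvNormMap ra).keys (fun a => a)
        (fun a => pvResolveA (pvNormMap ra) ((pvNormMap ra).size + 1) PySem.Set.empty a)
        PySem.Dict.empty (fun a _ => rfl) (by simpa using hnodup)
      simpa using h
    rw [hA]
    apply List.map_congr_left
    intro k hk
    have h1 : (pvNormMap ra).get? (pvChase (pvNormMap ra) (pvNormMap ra).size k) = none := hacy k hk
    rw [resolveA_eq_chase (pvNormMap ra) (pvNormMap ra).size PySem.Set.empty k h1
      (by intro x hx; cases hx)]
    rw [PySem.Dict.getD_eq_get?_getD, hget k hk]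
    rfl
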